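-- pv_equiv track=rewrite | github.com/Florisheinen1/AOC | 2022/ass4/ass4.py | somewhat_overlaps
-- ===== SOURCE A (Python) =====
-- def somewhat_overlaps(a, b):
-- 	for c in a:
-- 		if c in b:
-- 			return True
-- 	for c in b:
-- 		if c in a:
-- 			return True
-- 	return False
-- ===== SOURCE B (Python) =====
-- def somewhat_overlaps(a, b):
-- 	xs = sorted(a)
-- 	ys = sorted(b)
-- 	i = 0
-- 	j = 0
-- 	while i < len(xs) and j < len(ys):
-- 		if xs[i] == ys[j]:
-- 			return True
-- 		if xs[i] < ys[j]:
-- 			i += 1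
-- 		else:
-- 			j += 1
-- 	return False
-- ===== Notes on version B (the rewrite author's own statement) =====
-- stated objective: alternative
-- what changed: Replaces the two nested membership-scan loops by sorting both lists and a single two-pointer merge scan that detects a common element.
import Mathlib
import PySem

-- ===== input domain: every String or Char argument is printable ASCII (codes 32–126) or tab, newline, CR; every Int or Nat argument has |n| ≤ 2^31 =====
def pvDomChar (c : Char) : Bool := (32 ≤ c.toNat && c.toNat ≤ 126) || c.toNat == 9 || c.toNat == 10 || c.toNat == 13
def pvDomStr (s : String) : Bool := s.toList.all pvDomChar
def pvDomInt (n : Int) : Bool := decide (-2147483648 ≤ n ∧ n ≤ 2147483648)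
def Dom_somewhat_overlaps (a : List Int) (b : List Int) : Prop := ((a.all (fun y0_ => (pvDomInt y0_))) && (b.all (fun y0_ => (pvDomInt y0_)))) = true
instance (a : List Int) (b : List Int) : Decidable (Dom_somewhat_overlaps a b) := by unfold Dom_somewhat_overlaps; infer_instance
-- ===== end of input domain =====

-- B sorts both lists and detects a common element by a single two-pointer merge scan
-- instead of A's two nested membership-scan loops (an alternative algorithm, not claimed faster).

-- ===== PORT A =====
-- first loop: for c in a: if c in b: return True
def somewhat_overlaps_loop1 (a : List Int) (b : List Int) : Bool :=
  match a with
  | [] => false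
  | c :: rest => if b.contains c then true else somewhat_overlaps_loop1 rest b

-- second loop: for c in b: if c in a: return True
def somewhat_overlaps_loop2 (b : List Int) (a : List Int) : Bool :=
  match b with
  | [] => false
  | c :: rest => if a.contains c then true else somewhat_overlaps_loop2 rest a

def somewhat_overlaps (a : List Int) (b : List Int) : Bool :=
  if somewhat_overlaps_loop1 a b then true
  else if somewhat_overlaps_loop2 b a then true
  else false

-- ===== PORT B =====
-- the while loop over the two sorted lists, as structural recursion on the suffixes at i and j
def somewhat_overlaps_scan (xs : List Int) (ys : List Int) : Bool :=
  match xs, ys with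
  | [], _ => false
  | _, [] => false
  | x :: xs', y :: ys' =>
    if x == y then true
    else if x < y then somewhat_overlaps_scan xs' (y :: ys')
    else somewhat_overlaps_scan (x :: xs') ys'

def somewhat_overlaps_alt (a : List Int) (b : List Int) : Bool :=
  somewhat_overlaps_scan (PySem.List.sorted a (fun x => x) false) (PySem.List.sorted b (fun x => x) false)

-- ===== PRECONDITION & SPEC =====
def Spec_somewhat_overlaps (a : List Int) (b : List Int) (out : Bool) : Prop := out = somewhat_overlaps_alt a b
instance (a : List Int) (b : List Int) (out : Bool) : Decidable (Spec_somewhat_overlaps a b out) := by unfold Spec_somewhat_overlaps; infer_instance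

-- ===== CLAIM (what is proved, stated in full; the proofs are below) =====
def Claim_equal_somewhat_overlaps : Prop := ∀ (a : List Int) (b : List Int), Dom_somewhat_overlaps a b → Spec_somewhat_overlaps a b (somewhat_overlaps a b)

-- ===== LEMMAS AND PROOFS =====
theorem loop1_eq_any (a b : List Int) :
    somewhat_overlaps_loop1 a b = a.any (fun c => b.contains c) := by
  induction a with
  | nil => rfl
  | cons c rest ih => simp [somewhat_overlaps_loop1, ih]

theorem loop2_eq_any (b a : List Int) :
    somewhat_overlaps_loop2 b a = b.any (fun c => a.contains c) := by
  induction b with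
  | nil => rfl
  | cons c rest ih => simp [somewhat_overlaps_loop2, ih]

theorem any_contains_comm (a b : List Int) :
    a.any (fun c => b.contains c) = b.any (fun c => a.contains c) := by
  rw [Bool.eq_iff_iff]
  simp only [List.any_eq_true, List.contains_iff_mem]
  exact ⟨fun ⟨x, h1, h2⟩ => ⟨x, h2, h1⟩, fun ⟨x, h1, h2⟩ => ⟨x, h2, h1⟩⟩

-- on sorted inputs the merge scan decides "some common element"
theorem scan_iff (xs ys : List Int)
    (hx : xs.Pairwise (fun p q : Int => p ≤ q)) (hy : ys.Pairwise (fun p q : Int => p ≤ q)) :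
    somewhat_overlaps_scan xs ys = true ↔ ∃ v, v ∈ xs ∧ v ∈ ys := by
  induction xs, ys using somewhat_overlaps_scan.induct with
  | case1 ys => simp [somewhat_overlaps_scan]
  | case2 xs h => cases xs <;> simp [somewhat_overlaps_scan]
  | case3 x xs' y ys' heq =>
      simp only [somewhat_overlaps_scan, heq, if_pos]
      simp only [beq_iff_eq] at heq
      subst heq
      simp only [true_iff]
      exact ⟨x, by simp, by simp⟩
  | case4 x xs' y ys' hne hlt ih =>
      have hx' := (List.pairwise_cons.mp hx).2
      rw [somewhat_overlaps_scan, if_neg (by simpa using hne), if_pos hlt, ih hx' hy]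
      constructor
      · rintro ⟨v, hv1, hv2⟩; exact ⟨v, List.mem_cons_of_mem _ hv1, hv2⟩
      · rintro ⟨v, hv1, hv2⟩
        rcases List.mem_cons.mp hv1 with rfl | hv1
        · -- v = x is in y :: ys' but x < y ≤ every element of y :: ys': contradiction
          rcases List.mem_cons.mp hv2 with rfl | hv2
          · simp at hne
          · have := (List.pairwise_cons.mp hy).1 v hv2
            omega
        · exact ⟨v, hv1, hv2⟩
  | case5 x xs' y ys' hne hge ih =>
      have hy' := (List.pairwise_cons.mp hy).2
      rw [somewhat_overlaps_scan, if_neg (by simpa using hne), if_neg hge, ih hx hy']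
      constructor
      · rintro ⟨v, hv1, hv2⟩; exact ⟨v, hv1, List.mem_cons_of_mem _ hv2⟩
      · rintro ⟨v, hv1, hv2⟩
        rcases List.mem_cons.mp hv2 with rfl | hv2
        · rcases List.mem_cons.mp hv1 with rfl | hv1
          · simp at hne
          · have := (List.pairwise_cons.mp hx).1 v hv1
            have hne' : x ≠ v := by simpa [beq_iff_eq] using hne
            omega
        · exact ⟨v, hv1, hv2⟩

theorem alt_eq_any (a b : List Int) :
    somewhat_overlaps_alt a b = a.any (fun c => b.contains c) := by
  unfold somewhat_overlaps_alt
  rw [Bool.eq_iff_iff]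
  rw [scan_iff _ _ (PySem.List.sorted_pairwise a (fun x => x) )
        (PySem.List.sorted_pairwise b (fun x => x))]
  simp only [List.any_eq_true, List.contains_iff_mem, PySem.List.mem_sorted]

-- ===== VERDICT (by name: the statement is the Claim_ definition above) =====
theorem somewhat_overlaps_spec : Claim_equal_somewhat_overlaps := by
  intro a b _
  unfold Spec_somewhat_overlaps somewhat_overlaps
  rw [loop1_eq_any, loop2_eq_any, ← any_contains_comm a b, alt_eq_any]
  cases a.any (fun c => b.contains c) <;> rfl
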